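-- pv_equiv track=rewrite | github.com/fxrcode/LeetPy | Leet/830_Positions_of_Large_Groups.py | largeGroupPositions
-- ===== SOURCE A (Python) =====
-- from typing import List
--
-- def largeGroupPositions(s: str) -> List[List[int]]:
--     def rle_groupby():
--         # Runtime: 39 ms, faster than 87.50% of Python3 online submissions for Positions of Large Groups.
--         l, r = 0, 0
--         res = []
--         while l < len(s):
--             while r < len(s) and s[l] == s[r]:
--                 r += 1
--             # r == len(s) or s[l] != s[r]:
--             if r - l >= 3:
--                 res.append([l, r - 1])
--             l = r
--         return res
--
--     return rle_groupby()
--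
--     def os():
--         """
--         Runtime: 54 ms, faster than 45.09% of Python3 online submissions for Positions of Large Groups.
--
--         """
--         res = []
--         i = 0  # start of each group
--         for j in range(len(s)):
--             if j == len(s) - 1 or s[j] != s[j + 1]:
--                 # here, [i,j] repr a group
--                 if j - i + 1 >= 3:
--                     res.append([i, j])
--                 i = j + 1
--         return res
--
--     return os()
--
--     def fxr():
--         # Runtime: 82 ms, faster than 6.80% of Python3 online submissions for Positions of Large Groups.
--         pre, idx = "", 0
--         res = []
--         for i, c in enumerate(s + "*"):
--             if pre != c:
--                 if pre and i - idx >= 3: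
--                     res.append([idx, i - 1])
--                 pre, idx = c, i
--         return res
--
--     return fxr()
-- ===== SOURCE B (Python) =====
-- from typing import List
--
-- def largeGroupPositions(s: str) -> List[List[int]]:
--     # Staged, index-based approach: first list every "cut" position where a new
--     # run begins (plus the two ends), then pair adjacent cuts and keep wide gaps.
--     n = len(s)
--     cuts = [0] + [j for j in range(1, n) if s[j] != s[j - 1]] + [n]
--     return [[a, b - 1] for a, b in zip(cuts, cuts[1:]) if b - a >= 3]
-- ===== Notes on version B (the rewrite author's own statement) =====
-- stated objective: alternative
-- what changed: Replaced A's nested two-pointer while-loops that emit results during the scan by a staged index computation: a comprehension lists every cut position where a new run begins (plus both ends), adjacent cuts are paired by zipping the cut list with its own tail, and a second comprehension keeps the pairs at least 3 apart.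
import Mathlib
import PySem

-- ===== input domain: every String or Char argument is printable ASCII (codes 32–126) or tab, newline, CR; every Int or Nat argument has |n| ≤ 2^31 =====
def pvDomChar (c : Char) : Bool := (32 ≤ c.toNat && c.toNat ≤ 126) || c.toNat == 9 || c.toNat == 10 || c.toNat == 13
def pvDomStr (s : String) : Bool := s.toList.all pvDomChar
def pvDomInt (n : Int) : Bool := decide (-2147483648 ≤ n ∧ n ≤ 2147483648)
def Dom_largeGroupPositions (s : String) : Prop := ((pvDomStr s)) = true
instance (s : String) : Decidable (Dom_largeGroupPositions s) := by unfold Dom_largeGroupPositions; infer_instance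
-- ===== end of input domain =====

-- B replaces A's nested two-pointer scan by a staged index computation: list the cut
-- positions where a new run begins, pair adjacent cuts by zipping the list with its
-- own tail, and keep the wide gaps (alternative decomposition, same cost).

-- ===== PORT A =====
-- inner `while r < len(s) and s[l] == s[r]: r += 1` (returns the final r)
def findR (cs : List Char) (l r : Nat) : Nat :=
  if h : r < cs.length ∧ cs.getD l default == cs.getD r default then
    findR cs l (r + 1)
  else r
termination_by cs.length - r
decreasing_by omega

-- termination fact for the outer loop: the inner loop strictly advances
theorem findR_ge (cs : List Char) (l : Nat) : ∀ r, r ≤ findR cs l r := by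
  intro r
  induction hk : cs.length - r using Nat.strong_induction_on generalizing r with
  | _ k ih =>
    unfold findR
    split
    · rename_i h
      have := ih (cs.length - (r + 1)) (by omega) (r + 1) rfl
      omega
    · omega

theorem findR_gt (cs : List Char) (l : Nat) (h : l < cs.length) : l < findR cs l l := by
  rw [findR]
  rw [dif_pos ⟨h, beq_self_eq_true _⟩]
  have := findR_ge cs l (l + 1)
  omega

-- outer `while l < len(s)` loop of rle_groupby
def aLoop (cs : List Char) (l : Nat) : List (List Int) :=
  if _h : l < cs.length then
    (if findR cs l l - l ≥ 3 then [[(l : Int), (findR cs l l : Int) - 1]] else [])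
      ++ aLoop cs (findR cs l l)
  else []
termination_by cs.length - l
decreasing_by
  have := findR_gt cs l _h
  omega

def largeGroupPositions (s : String) : List (List Int) := aLoop s.toList 0

-- ===== PORT B =====
-- the comprehension's condition `s[j] != s[j - 1]`
def bP (cs : List Char) (j : Nat) : Bool := cs.getD j default != cs.getD (j - 1) default

-- `cuts = [0] + [j for j in range(1, n) if s[j] != s[j - 1]] + [n]`
def bCuts (cs : List Char) : List Nat :=
  [0] ++ (List.range' 1 (cs.length - 1)).filter (bP cs) ++ [cs.length]

-- `[[a, b - 1] for a, b in zip(cuts, cuts[1:]) if b - a >= 3]`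
def largeGroupPositions_alt (s : String) : List (List Int) :=
  ((bCuts s.toList).zip (bCuts s.toList).tail).filterMap (fun p =>
    if p.2 - p.1 ≥ 3 then some [(p.1 : Int), (p.2 : Int) - 1] else none)

-- ===== PRECONDITION & SPEC =====
def Spec_largeGroupPositions (s : String) (out : List (List Int)) : Prop := out = largeGroupPositions_alt s
instance (s : String) (out : List (List Int)) : Decidable (Spec_largeGroupPositions s out) := by unfold Spec_largeGroupPositions; infer_instance

-- ===== CLAIM (what is proved, stated in full; the proofs are below) =====
def Claim_equal_largeGroupPositions : Prop := ∀ (s : String), Dom_largeGroupPositions s → Spec_largeGroupPositions s (largeGroupPositions s)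

-- ===== LEMMAS AND PROOFS =====

-- canonical run decomposition of a suffix, used to relate the two ports
def runsOf (cs : List Char) (i : Nat) : List (Nat × Nat) :=
  match cs with
  | [] => []
  | c :: t =>
    let n := 1 + (t.takeWhile (fun x => x == c)).length
    (i, n) :: runsOf (t.drop (n - 1)) (i + n)
termination_by cs.length
decreasing_by
  simp only [List.length_cons, List.length_drop]
  omega

-- A's filter, as a function
def gFilt (p : Nat × Nat) : Option (List Int) :=
  if p.2 ≥ 3 then some [(p.1 : Int), (p.1 : Int) + (p.2 : Int) - 1] else none

theorem runsOf_nil (i : Nat) : runsOf [] i = [] := by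
  rw [runsOf]

theorem runsOf_cons (c : Char) (t : List Char) (i : Nat) :
    runsOf (c :: t) i =
      (i, 1 + (t.takeWhile (fun x => x == c)).length) ::
        runsOf (t.drop (1 + (t.takeWhile (fun x => x == c)).length - 1))
          (i + (1 + (t.takeWhile (fun x => x == c)).length)) := by
  rw [runsOf]

theorem findR_spec (cs : List Char) (l : Nat) : ∀ r, r ≤ cs.length →
    findR cs l r = r + ((cs.drop r).takeWhile (fun x => x == cs.getD l default)).length := by
  intro r
  induction hk : cs.length - r using Nat.strong_induction_on generalizing r with
  | _ k ih =>
    intro hr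
    rw [findR]
    split
    · rename_i h
      obtain ⟨hrl, hbeq⟩ := h
      have hrec := ih (cs.length - (r + 1)) (by omega) (r + 1) rfl (by omega)
      have hdrop : cs.drop r = cs.getD r default :: cs.drop (r + 1) := by
        rw [List.getD_eq_getElem cs default hrl]
        exact List.drop_eq_getElem_cons hrl
      have heq := eq_of_beq hbeq
      rw [hrec, hdrop, List.takeWhile_cons]
      simp only [heq, beq_self_eq_true, if_true, List.length_cons]
      omega
    · rename_i h
      rcases Nat.lt_or_ge r cs.length with hrl | hrl
      · have hbeq : ¬ (cs.getD l default == cs.getD r default) = true := fun hb => h ⟨hrl, hb⟩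
        have hdrop : cs.drop r = cs.getD r default :: cs.drop (r + 1) := by
          rw [List.getD_eq_getElem cs default hrl]
          exact List.drop_eq_getElem_cons hrl
        have hb : (cs.getD r default == cs.getD l default) = false := by
          apply beq_eq_false_iff_ne.mpr
          intro he
          exact hbeq (by rw [he]; exact beq_self_eq_true _)
        rw [hdrop, List.takeWhile_cons]
        simp only [hb, Bool.false_eq_true, if_false, List.length_nil]
        omega
      · have hnil : cs.drop r = [] := List.drop_eq_nil_of_le hrl
        simp [hnil]

-- getD through drop
theorem getD_drop (cs : List Char) (a i : Nat) (h : a + i < cs.length) :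
    (cs.drop a).getD i default = cs.getD (a + i) default := by
  rw [List.getD_eq_getElem _ default (by simp; omega), List.getD_eq_getElem _ default h]
  simp

-- elements inside the taken prefix equal the run character
theorem takeWhile_getD_eq (c : Char) : ∀ (L : List Char) (k : Nat),
    k < (L.takeWhile (fun x => x == c)).length → L.getD k default = c := by
  intro L
  induction L with
  | nil => intro k hk; simp at hk
  | cons a t ih =>
    intro k hk
    by_cases ha : (a == c) = true
    · have hac := eq_of_beq ha
      cases k with
      | zero => simpa using hac
      | succ m =>
        rw [List.takeWhile_cons, if_pos ha, List.length_cons] at hk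
        simpa using ih m (by omega)
    · rw [List.takeWhile_cons, if_neg ha] at hk
      simp at hk

-- the element just past the taken prefix differs from the run character
theorem takeWhile_stop (c : Char) : ∀ (L : List Char),
    (L.takeWhile (fun x => x == c)).length < L.length →
    L.getD (L.takeWhile (fun x => x == c)).length default ≠ c := by
  intro L
  induction L with
  | nil => intro h; simp at h
  | cons a t ih =>
    intro h
    by_cases ha : (a == c) = true
    · rw [List.takeWhile_cons, if_pos ha] at h ⊢
      simp only [List.length_cons] at h ⊢
      simpa using ih (by omega)
    · rw [List.takeWhile_cons, if_neg ha]
      intro hc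
      simp at hc
      exact ha (by simp [hc])

-- A's loop computes the filtered canonical runs of the suffix
theorem aLoop_eq (cs : List Char) : ∀ l, l ≤ cs.length →
    aLoop cs l = (runsOf (cs.drop l) l).filterMap gFilt := by
  intro l
  induction hk : cs.length - l using Nat.strong_induction_on generalizing l with
  | _ k ih =>
    intro hl
    rw [aLoop]
    split
    · rename_i h
      have hspec := findR_spec cs l l (by omega)
      have hdrop : cs.drop l = cs.getD l default :: cs.drop (l + 1) := by
        rw [List.getD_eq_getElem cs default h]
        exact List.drop_eq_getElem_cons h
      set c := cs.getD l default with hc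
      set tw := ((cs.drop (l + 1)).takeWhile (fun x => x == c)).length with htw
      have htww : ((cs.drop l).takeWhile (fun x => x == c)).length = 1 + tw := by
        rw [hdrop, List.takeWhile_cons]
        try simp only [beq_self_eq_true, if_true, List.length_cons]
        omega
      have hr : findR cs l l = l + (1 + tw) := by rw [hspec, htww]
      have htwle : tw ≤ cs.length - l - 1 := by
        have : ((cs.drop (l+1)).takeWhile (fun x => x == c)).length ≤ (cs.drop (l+1)).length :=
          (List.takeWhile_sublist _).length_le
        simpa using this
      have hrle : findR cs l l ≤ cs.length := by omega
      have hrec := ih (cs.length - findR cs l l) (by omega) (findR cs l l) rfl hrle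
      rw [hrec]
      conv_rhs => rw [hdrop, runsOf_cons]
      rw [List.filterMap_cons]
      have hdrop2 : (cs.drop (l + 1)).drop (1 + tw - 1) = cs.drop (findR cs l l) := by
        rw [List.drop_drop, hr]; congr 1; omega
      rw [hdrop2]
      have hstart : l + (1 + tw) = findR cs l l := hr.symm
      rw [hstart]
      unfold gFilt
      by_cases h3 : 1 + tw ≥ 3
      · rw [if_pos (by omega : findR cs l l - l ≥ 3), if_pos (by simpa using h3)]
        simp only [List.cons_append, List.nil_append]
        have hv : (findR cs l l : Int) - 1 = (l : Int) + ((1 + tw : Nat) : Int) - 1 := by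
          rw [hr]; push_cast; ring
        rw [hv]
      · rw [if_neg (by omega : ¬ findR cs l l - l ≥ 3), if_neg (by simpa using h3)]
        simp
    · rename_i h
      have : cs.drop l = [] := List.drop_eq_nil_of_le (by omega)
      simp [this, runsOf]

-- B's cut list, zipped with its tail, enumerates the canonical runs as (start, end+1) pairs
theorem bound_runs (cs : List Char) : ∀ start, start < cs.length →
    ((start :: ((List.range' (start + 1) (cs.length - start - 1)).filter (bP cs) ++ [cs.length])).zip
      (((List.range' (start + 1) (cs.length - start - 1)).filter (bP cs)) ++ [cs.length]))
    = (runsOf (cs.drop start) start).map (fun p => (p.1, p.1 + p.2)) := by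
  intro start
  induction hk : cs.length - start using Nat.strong_induction_on generalizing start with
  | _ k ih =>
    intro hs
    subst hk
    have hdrop : cs.drop start = cs.getD start default :: cs.drop (start + 1) := by
      rw [List.getD_eq_getElem cs default hs]
      exact List.drop_eq_getElem_cons hs
    set c := cs.getD start default with hc
    set tw := ((cs.drop (start + 1)).takeWhile (fun x => x == c)).length with htw
    have htwle : tw ≤ cs.length - start - 1 := by
      have : ((cs.drop (start+1)).takeWhile (fun x => x == c)).length ≤ (cs.drop (start+1)).length :=
        (List.takeWhile_sublist _).length_le
      simpa using this
    have hall : ∀ i, start ≤ i → i < start + 1 + tw → cs.getD i default = c := by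
      intro i h1 h2
      rcases Nat.eq_or_lt_of_le h1 with he | hlt
      · rw [← he]
      · have hkk : i - (start + 1) < tw := by omega
        have hg := takeWhile_getD_eq c (cs.drop (start + 1)) (i - (start + 1)) (by rw [← htw]; omega)
        rw [getD_drop cs (start + 1) (i - (start + 1)) (by omega)] at hg
        have he2 : start + 1 + (i - (start + 1)) = i := by omega
        rw [he2] at hg
        exact hg
    have hruns : runsOf (cs.drop start) start
        = (start, 1 + tw) :: runsOf (cs.drop (start + 1 + tw)) (start + 1 + tw) := by
      rw [hdrop, runsOf_cons]
      congr 2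
      · rw [List.drop_drop]; congr 1; omega
      · omega
    obtain ⟨rest, hrest⟩ : ∃ r, cs.length - start - 1 = tw + r :=
      ⟨cs.length - start - 1 - tw, by omega⟩
    have hsplit : List.range' (start + 1) (cs.length - start - 1)
        = List.range' (start + 1) (tw) ++ List.range' (start + 1 + tw) rest := by
      rw [hrest, ← List.range'_append]
      simp
    have hfilt1 : (List.range' (start + 1) tw).filter (bP cs) = [] := by
      rw [List.filter_eq_nil_iff]
      intro i hi
      have hmem : start + 1 ≤ i ∧ i < start + 1 + tw := by
        have := List.mem_range'_1.mp hi
        omega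
      simp only [bP, bne_iff_ne, ne_eq, Decidable.not_not]
      rw [hall i (by omega) (by omega), hall (i - 1) (by omega) (by omega)]
    by_cases hjl : start + 1 + tw < cs.length
    · -- a boundary exists at j = start + 1 + tw
      have hbnd : cs.getD (start + 1 + tw) default ≠ c := by
        have := takeWhile_stop c (cs.drop (start + 1)) (by rw [← htw]; simp; omega)
        rw [← htw, getD_drop cs (start + 1) tw (by omega)] at this
        exact this
      have hPj : bP cs (start + 1 + tw) = true := by
        simp only [bP, bne_iff_ne, ne_eq]
        have h1 : cs.getD (start + 1 + tw - 1) default = c := hall _ (by omega) (by omega)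
        rw [h1]
        exact hbnd
      have hr2 : List.range' (start + 1 + tw) rest
          = (start + 1 + tw) :: List.range' (start + 1 + tw + 1) (cs.length - (start + 1 + tw) - 1) := by
        have he : rest = (cs.length - (start + 1 + tw) - 1) + 1 := by omega
        rw [he, List.range'_succ]
      rw [hsplit, List.filter_append, hfilt1, List.nil_append, hr2,
        List.filter_cons_of_pos hPj]
      rw [List.cons_append, List.zip_cons_cons]
      have hIH := ih (cs.length - (start + 1 + tw)) (by clear_value tw; omega) (start + 1 + tw) rfl (by omega)
      rw [hIH, hruns, List.map_cons, Nat.add_assoc]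
    · -- the run reaches the end of the string
      have hje : start + 1 + tw = cs.length := by omega
      have hr0 : rest = 0 := by omega
      rw [hsplit, List.filter_append, hfilt1, hr0]
      simp only [List.range'_zero, List.filter_nil, List.nil_append, List.append_nil]
      rw [hruns, hje]
      simp [runsOf_nil, List.zip_cons_cons]
      omega

-- ===== VERDICT (by name: the statement is the Claim_ definition above) =====
theorem largeGroupPositions_spec : Claim_equal_largeGroupPositions := by
  intro s _
  unfold Spec_largeGroupPositions largeGroupPositions largeGroupPositions_alt
  rcases Nat.eq_zero_or_pos s.toList.length with h0 | hpos
  · have hnil : s.toList = [] := List.length_eq_zero_iff.mp h0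
    rw [hnil]
    simp [aLoop, bCuts]
  · rw [aLoop_eq s.toList 0 (by omega)]
    have hb : bCuts s.toList
        = 0 :: ((List.range' (0 + 1) (s.toList.length - 0 - 1)).filter (bP s.toList) ++ [s.toList.length]) := by
      simp [bCuts]
    rw [hb]
    simp only [List.tail_cons]
    rw [bound_runs s.toList 0 hpos, List.drop_zero, List.filterMap_map]
    apply List.filterMap_congr
    intro p _
    simp only [Function.comp, gFilt, Nat.add_sub_cancel_left]
    split
    · congr 2
    · rfl
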